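-- pv_equiv track=rewrite | github.com/faint4/waf-bypass-tester | src/encoder.py | ssrf_ip_decimal
-- ===== SOURCE A (Python) =====
-- def ssrf_ip_decimal(ip: str) -> str:
--     """IP地址转十进制（绕过IP黑名单）
--     127.0.0.1 → 2130706433
--     来源：最佳实践
--     """
--     parts = ip.split('.')
--     if len(parts) == 4:
--         try:
--             decimal = sum(int(p) << (24 - 8 * i) for i, p in enumerate(parts))
--             return str(decimal)
--         except ValueError:
--             return ip
--     return ip
-- ===== SOURCE B (Python) =====
-- def _weigh(parts):
--     """Right-to-left structural recursion: returns (value, weight) where value is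
--     the base-256 value of the dotted tail and weight = 256 ** len(parts)."""
--     if not parts:
--         return 0, 1
--     value, weight = _weigh(parts[1:])
--     return int(parts[0]) * weight + value, weight * 256
--
--
-- def ssrf_ip_decimal(ip: str) -> str:
--     """IP地址转十进制（绕过IP黑名单） — recursive right-to-left place-value build."""
--     parts = ip.split('.')
--     if len(parts) != 4:
--         return ip
--     try:
--         value, _ = _weigh(parts)
--     except ValueError:
--         return ip
--     return str(value)
-- ===== Notes on version B (the rewrite author's own statement) =====
-- stated objective: alternative
-- what changed: Replaces the single-pass enumerate-indexed generator summing bit-shifted octets (int(p) << (24-8*i)) with an early-return length guard plus a recursive right-to-left traversal that builds the number back-to-front, threading a (value, weight) pair where the weight (256**len(tail)) is computed by the recursion itself rather than from an index.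
import Mathlib
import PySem

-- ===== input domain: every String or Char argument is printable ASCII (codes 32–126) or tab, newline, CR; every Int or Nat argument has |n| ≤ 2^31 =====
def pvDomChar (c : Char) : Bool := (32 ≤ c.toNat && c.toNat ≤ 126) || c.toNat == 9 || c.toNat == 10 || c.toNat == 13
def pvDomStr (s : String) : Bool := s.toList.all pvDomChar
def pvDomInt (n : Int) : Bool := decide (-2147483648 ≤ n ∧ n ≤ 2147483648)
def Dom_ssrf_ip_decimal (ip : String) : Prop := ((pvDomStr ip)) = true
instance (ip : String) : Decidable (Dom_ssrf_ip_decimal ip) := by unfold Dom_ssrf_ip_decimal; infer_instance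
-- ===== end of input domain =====

-- B builds the number back-to-front by structural recursion threading a (value, weight)
-- pair, instead of A's enumerate-indexed generator of bit-shifted octets (objective: alternative).

-- ===== PORT A =====
-- split? is some for the nonempty separator "."; the try'd generator is a fold over
-- enumerate where the first ValueError (none from int(p)) poisons the sum.
def ssrf_ip_decimal (ip : String) : String :=
  match PySem.Str.split? ip "." with
  | none => ip
  | some parts =>
    if parts.length = 4 then
      match (PySem.List.enumerate parts).foldl
          (fun (acc : Option Int) (pr : Int × String) =>
            match acc, PySem.Int.ofStr? pr.2 with
            | some s, some v => some (s + (v <<< (24 - 8 * pr.1).toNat))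
            | _, _ => none) (some 0) with
      | some decimal => PySem.Int.toStr decimal
      | none => ip
    else ip

-- ===== PORT B =====
-- _weigh's recursion: the ValueError of int(parts[0]) propagates, hence Option
def ssrfWeigh : List String → Option (Int × Int)
  | [] => some (0, 1)
  | p :: rest =>
    match ssrfWeigh rest with
    | some (value, weight) =>
      match PySem.Int.ofStr? p with
      | some o => some (o * weight + value, weight * 256)
      | none => none
    | none => none

def ssrf_ip_decimal_alt (ip : String) : String :=
  match PySem.Str.split? ip "." with
  | some parts =>
    if parts.length ≠ 4 then ip
    else
      match ssrfWeigh parts with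
      | some (value, _) => PySem.Int.toStr value
      | none => ip
  | none => ip

-- ===== PRECONDITION & SPEC =====
def Spec_ssrf_ip_decimal (ip : String) (out : String) : Prop := out = ssrf_ip_decimal_alt ip
instance (ip : String) (out : String) : Decidable (Spec_ssrf_ip_decimal ip out) := by unfold Spec_ssrf_ip_decimal; infer_instance

-- ===== CLAIM (what is proved, stated in full; the proofs are below) =====
def Claim_equal_ssrf_ip_decimal : Prop := ∀ (ip : String), Dom_ssrf_ip_decimal ip → Spec_ssrf_ip_decimal ip (ssrf_ip_decimal ip)

-- ===== LEMMAS AND PROOFS =====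

-- on four parts, the shifted place-value sum equals the back-to-front (value, weight) recursion
theorem ssrf_core (x a b c d : String) :
    (match (PySem.List.enumerate [a, b, c, d]).foldl
        (fun (acc : Option Int) (pr : Int × String) =>
          match acc, PySem.Int.ofStr? pr.2 with
          | some s, some v => some (s + (v <<< (24 - 8 * pr.1).toNat))
          | _, _ => none) (some 0) with
     | some decimal => PySem.Int.toStr decimal
     | none => x) =
    (match ssrfWeigh [a, b, c, d] with
     | some (value, _) => PySem.Int.toStr value
     | none => x) := by
  simp only [PySem.List.enumerate_cons, PySem.List.enumerate_nil, List.foldl, ssrfWeigh]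
  cases h0 : PySem.Int.ofStr? a <;> cases h1 : PySem.Int.ofStr? b <;>
    cases h2 : PySem.Int.ofStr? c <;> cases h3 : PySem.Int.ofStr? d <;>
    simp [Int.shiftLeft_eq] <;> ring_nf

-- ===== VERDICT (by name: the statement is the Claim_ definition above) =====
theorem ssrf_ip_decimal_spec : Claim_equal_ssrf_ip_decimal := by
  intro ip _
  unfold Spec_ssrf_ip_decimal ssrf_ip_decimal ssrf_ip_decimal_alt
  cases hs : PySem.Str.split? ip "." with
  | none => rfl
  | some parts =>
    dsimp only
    by_cases h : parts.length = 4
    · match parts, h with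
      | [a, b, c, d], _ =>
        simpa using ssrf_core ip a b c d
    · simp [h]
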